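-- pv_equiv track=rewrite | github.com/mahmoudmostafa0/fhir-mcp | fhir_mcp_server.py | _extract_coding_display
-- ===== SOURCE A (Python) =====
-- from typing import Any, Dict, List, Optional, Set
--
-- def _extract_coding_display(codings: List[Dict[str, Any]]) -> str:
--     """Extract display text from a list of codings."""
--     if not codings:
--         return ""
--     for coding in codings:
--         if "display" in coding:
--             return coding["display"]
--     # Fallback to code if no display
--     for coding in codings:
--         if "code" in coding:
--             return coding["code"]
--     return ""
-- ===== SOURCE B (Python) =====
-- from typing import Any, Dict, List
--
-- def _extract_coding_display(codings: List[Dict[str, Any]]) -> str: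
--     """Extract display text from a list of codings (single pass)."""
--     have_code = False
--     first_code = ""
--     for coding in codings:
--         if "display" in coding:
--             return coding["display"]
--         if not have_code and "code" in coding:
--             have_code = True
--             first_code = coding["code"]
--     return first_code if have_code else ""
-- ===== Notes on version B (the rewrite author's own statement) =====
-- stated objective: alternative
-- what changed: Replaced A's two sequential scans (one for the first 'display', one for the first 'code') by a single pass that returns on the first 'display' and captures the first 'code' into a flag-guarded fallback variable.
import Mathlib
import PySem

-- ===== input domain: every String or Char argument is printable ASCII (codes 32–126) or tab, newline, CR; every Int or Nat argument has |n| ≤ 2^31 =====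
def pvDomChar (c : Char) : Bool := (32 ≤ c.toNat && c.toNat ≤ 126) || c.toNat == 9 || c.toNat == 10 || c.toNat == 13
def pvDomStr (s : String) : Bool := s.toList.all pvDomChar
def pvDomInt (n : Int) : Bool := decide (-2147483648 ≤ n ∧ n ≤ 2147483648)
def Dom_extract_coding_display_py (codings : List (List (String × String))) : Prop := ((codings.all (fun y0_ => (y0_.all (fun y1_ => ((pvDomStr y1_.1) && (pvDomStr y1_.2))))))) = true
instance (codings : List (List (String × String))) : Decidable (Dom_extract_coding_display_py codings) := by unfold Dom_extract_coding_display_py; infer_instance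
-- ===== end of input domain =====

-- B is a single pass over codings (one loop with a have_code flag) instead of A's
-- two sequential passes: objective 'alternative' (same O(n) cost, one traversal).

-- ===== PORT A =====
-- A's first loop: return coding["display"] for the first coding containing "display"
def pvAFindDisplay : List (List (String × String)) → Option String
  | [] => none
  | c :: rest =>
    match c.find? (fun p => p.1 == "display") with
    | some p => some p.2
    | none => pvAFindDisplay rest

-- A's second loop: return coding["code"] for the first coding containing "code"
def pvAFindCode : List (List (String × String)) → Option String
  | [] => none
  | c :: rest =>
    match c.find? (fun p => p.1 == "code") with
    | some p => some p.2
    | none => pvAFindCode rest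

def extract_coding_display_py (codings : List (List (String × String))) : String :=
  if codings = [] then ""
  else
    match pvAFindDisplay codings with
    | some s => s
    | none =>
      match pvAFindCode codings with
      | some s => s
      | none => ""

-- ===== PORT B =====
-- B's single loop, carrying the have_code flag and the stored first code
def pvBLoop : List (List (String × String)) → Bool → String → String
  | [], haveCode, firstCode => if haveCode then firstCode else ""
  | c :: rest, haveCode, firstCode =>
    match c.find? (fun p => p.1 == "display") with
    | some p => p.2
    | none =>
      if haveCode then pvBLoop rest haveCode firstCode
      else
        match c.find? (fun p => p.1 == "code") with
        | some q => pvBLoop rest true q.2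
        | none => pvBLoop rest haveCode firstCode

def extract_coding_display_py_alt (codings : List (List (String × String))) : String :=
  pvBLoop codings false ""

-- ===== PRECONDITION & SPEC =====
def Spec_extract_coding_display_py (codings : List (List (String × String))) (out : String) : Prop := out = extract_coding_display_py_alt codings
instance (codings : List (List (String × String))) (out : String) : Decidable (Spec_extract_coding_display_py codings out) := by unfold Spec_extract_coding_display_py; infer_instance

-- ===== CLAIM (what is proved, stated in full; the proofs are below) =====
def Claim_equal_extract_coding_display_py : Prop := ∀ (codings : List (List (String × String))), Dom_extract_coding_display_py codings → Spec_extract_coding_display_py codings (extract_coding_display_py codings)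

-- ===== LEMMAS AND PROOFS =====
-- Once the flag is set, B only looks for a display and otherwise returns the stored code.
theorem pvBLoop_true (cs : List (List (String × String))) (fb : String) :
    pvBLoop cs true fb = match pvAFindDisplay cs with | some s => s | none => fb := by
  induction cs with
  | nil => rfl
  | cons c rest ih =>
    simp only [pvBLoop, pvAFindDisplay]
    cases c.find? (fun p => p.1 == "display") with
    | some p => rfl
    | none => simpa using ih

-- With the flag unset, B computes A's "first display, else first code, else empty".
theorem pvBLoop_false (cs : List (List (String × String))) (fb : String) :
    pvBLoop cs false fb =
      match pvAFindDisplay cs with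
      | some s => s
      | none => match pvAFindCode cs with | some s => s | none => "" := by
  induction cs with
  | nil => rfl
  | cons c rest ih =>
    simp only [pvBLoop, pvAFindDisplay, pvAFindCode]
    cases c.find? (fun p => p.1 == "display") with
    | some p => rfl
    | none =>
      simp only [Bool.false_eq_true, if_false]
      cases c.find? (fun p => p.1 == "code") with
      | some q => simpa using pvBLoop_true rest q.2
      | none => simpa using ih

-- ===== VERDICT (by name: the statement is the Claim_ definition above) =====
theorem extract_coding_display_py_spec : Claim_equal_extract_coding_display_py := by
  intro codings _
  unfold Spec_extract_coding_display_py extract_coding_display_py extract_coding_display_py_alt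
  rw [pvBLoop_false]
  cases codings with
  | nil => rfl
  | cons c rest => simp
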